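-- pv_equiv track=rewrite | github.com/google-research/pegasus | pegasus/eval/extractive/extractive_scorer.py | _greedily_extract
-- ===== SOURCE A (Python) =====
-- def _greedily_extract(a, s):
--   """Greedily calculate extractive fragments.
--
--   Exactly follows figure 3 in https://aclweb.org/anthology/N18-1065.
--   Args:
--     a: tokenized documents.
--     s: tokenized summary.
--
--   Returns:
--     extractive fragments.
--   """
--   fs = []
--   i = j = 0
--   while i < len(s):
--     f = []
--     while j < len(a):
--       if s[i] == a[j]:
--         ii, jj = i, j
--         while ii < len(s) and jj < len(a) and s[ii] == a[jj]:
--           ii, jj = ii + 1, jj + 1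
--         if len(f) < (ii - i):
--           f = s[i:ii]
--         j = jj
--       else:
--         j += 1
--     i, j = i + max(len(f), 1), 0
--     if f:
--       fs.append(f)
--   return fs
-- ===== SOURCE B (Python) =====
-- def _greedily_extract(a, s):
--   """Same greedy fragment extraction, but match lengths come from a suffix-LCP
--   DP table (L[i][j] = longest common prefix of s[i:] and a[j:]), so the inner
--   token-by-token extension loop disappears."""
--   n, m = len(s), len(a)
--   rows = [[0] * (m + 1)]  # rows[-1-i] is the LCP row for s[i:]
--   nxt = rows[0]
--   for i in range(n - 1, -1, -1):
--     si = s[i]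
--     row = [(nxt[j + 1] + 1 if si == a[j] else 0) for j in range(m)] + [0]
--     rows.append(row)
--     nxt = row
--   rows.reverse()  # rows[i] is now the row for position i of s
--   fs = []
--   i = 0
--   while i < n:
--     row = rows[i]
--     best = 0
--     j = 0
--     while j < m:
--       k = row[j]
--       if k:
--         if k > best:
--           best = k
--         j += k
--       else:
--         j += 1
--     if best:
--       fs.append(s[i:i + best])
--       i += best
--     else:
--       i += 1
--   return fs
-- ===== Notes on version B (the rewrite author's own statement) =====
-- stated objective: alternative
-- what changed: B precomputes a suffix-LCP dynamic-programming table (L[i][j] = longest common prefix of s[i:] and a[j:]) bottom-up, then runs the greedy jump scan purely on table lookups, eliminating A's innermost token-by-token extension loop and its repeated re-comparisons.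
import Mathlib
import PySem

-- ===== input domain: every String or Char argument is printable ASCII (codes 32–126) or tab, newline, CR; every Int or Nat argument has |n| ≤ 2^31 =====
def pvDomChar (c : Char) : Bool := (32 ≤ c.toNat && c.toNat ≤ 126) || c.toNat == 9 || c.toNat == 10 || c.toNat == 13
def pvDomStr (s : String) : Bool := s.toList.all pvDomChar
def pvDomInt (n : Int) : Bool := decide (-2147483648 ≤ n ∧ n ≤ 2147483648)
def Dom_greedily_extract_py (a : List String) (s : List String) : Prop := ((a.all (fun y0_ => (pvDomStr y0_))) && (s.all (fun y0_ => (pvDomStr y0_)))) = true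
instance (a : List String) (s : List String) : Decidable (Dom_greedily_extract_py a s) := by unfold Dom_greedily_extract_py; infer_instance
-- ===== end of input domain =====

-- B replaces A's innermost token-by-token extension loop by a precomputed suffix-LCP DP table
-- consulted during the same greedy jump scan; same return value, alternative algorithm.
-- (All while-loops are ported with a fuel parameter that only makes them total; the top-level
-- fuels s.length / a.length always suffice for the loops' actual iteration counts.)

-- ===== PORT A =====
-- innermost while: extend the match while tokens agree (fuel ≥ s.length - ii suffices)
def pvExtA (s a : List String) : Nat → Nat → Nat → Nat × Nat
  | 0, ii, jj => (ii, jj)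
  | fuel + 1, ii, jj =>
    if ii < s.length ∧ jj < a.length ∧ s.getD ii "" = a.getD jj "" then
      pvExtA s a fuel (ii + 1) (jj + 1)
    else (ii, jj)

-- middle while over j (i fixed; fuel ≥ a.length - j suffices when i < s.length)
def pvInnerA (s a : List String) (i : Nat) : Nat → Nat → List String → List String
  | 0, _, f => f
  | fuel + 1, j, f =>
    if j < a.length then
      if s.getD i "" = a.getD j "" then
        let p := pvExtA s a s.length i j
        let f' := if f.length < p.1 - i then PySem.List.slice s (some (i : Int)) (some (p.1 : Int)) else f
        pvInnerA s a i fuel p.2 f'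
      else pvInnerA s a i fuel (j + 1) f
    else f

-- outer while over i (fuel ≥ s.length - i suffices)
def pvOuterA (s a : List String) : Nat → Nat → List (List String) → List (List String)
  | 0, _, fs => fs
  | fuel + 1, i, fs =>
    if i < s.length then
      let f := pvInnerA s a i a.length 0 []
      pvOuterA s a fuel (i + max f.length 1) (if f ≠ [] then fs ++ [f] else fs)
    else fs

def greedily_extract_py (a : List String) (s : List String) : List (List String) :=
  pvOuterA s a s.length 0 []

-- ===== PORT B =====
-- one DP row: [(nxt[j+1]+1 if si==a[j] else 0) for j in range(m)] + [0]
def pvRowB (si : String) (a : List String) (nxt : List Nat) : List Nat :=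
  (List.range a.length).map (fun j => if si = a.getD j "" then nxt.getD (j + 1) 0 + 1 else 0) ++ [0]

-- all rows, built from the last suffix upwards; element i is the row for s[i:]
def pvRowsB (a : List String) : List String → List (List Nat)
  | [] => [List.replicate (a.length + 1) 0]
  | si :: rest =>
    let rs := pvRowsB a rest
    pvRowB si a (rs.headD []) :: rs

-- greedy jump scan over one row: j += k on a match of length k, else j += 1 (fuel ≥ m - j suffices)
def pvScanB (m : Nat) (row : List Nat) : Nat → Nat → Nat → Nat
  | 0, _, best => best
  | fuel + 1, j, best =>
    if j < m then
      let k := row.getD j 0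
      if k ≠ 0 then pvScanB m row fuel (j + k) (if k > best then k else best)
      else pvScanB m row fuel (j + 1) best
    else best

-- main greedy loop on table lookups (fuel ≥ s.length - i suffices)
def pvMainB (s a : List String) (rows : List (List Nat)) : Nat → Nat → List (List String) → List (List String)
  | 0, _, fs => fs
  | fuel + 1, i, fs =>
    if i < s.length then
      let best := pvScanB a.length (rows.getD i []) a.length 0 0
      if best ≠ 0 then
        pvMainB s a rows fuel (i + best) (fs ++ [PySem.List.slice s (some (i : Int)) (some ((i : Int) + (best : Int)))])
      else pvMainB s a rows fuel (i + 1) fs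
    else fs

def greedily_extract_py_alt (a : List String) (s : List String) : List (List String) :=
  pvMainB s a (pvRowsB a s) s.length 0 []

-- ===== PRECONDITION & SPEC =====
def Spec_greedily_extract_py (a : List String) (s : List String) (out : List (List String)) : Prop := out = greedily_extract_py_alt a s
instance (a : List String) (s : List String) (out : List (List String)) : Decidable (Spec_greedily_extract_py a s out) := by unfold Spec_greedily_extract_py; infer_instance

-- ===== CLAIM (what is proved, stated in full; the proofs are below) =====
def Claim_equal_greedily_extract_py : Prop := ∀ (a : List String) (s : List String), Dom_greedily_extract_py a s → Spec_greedily_extract_py a s (greedily_extract_py a s)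

-- ===== LEMMAS AND PROOFS =====

-- longest common prefix length of two token suffixes
def pvLcp : List String → List String → Nat
  | x :: xs, y :: ys => if x = y then pvLcp xs ys + 1 else 0
  | _, _ => 0

theorem pvLcp_le (xs ys : List String) : pvLcp xs ys ≤ xs.length := by
  induction xs generalizing ys with
  | nil => cases ys <;> simp [pvLcp]
  | cons x xs ih =>
    cases ys with
    | nil => simp [pvLcp]
    | cons y ys =>
      simp only [pvLcp, List.length_cons]
      split
      · have := ih ys; omega
      · omega

theorem pvLcp_nil_right (xs : List String) : pvLcp xs [] = 0 := by cases xs <;> rfl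

theorem pvLcp_zero (s a : List String) (i j : Nat) (h1 : i < s.length) (h2 : j < a.length)
    (hg : ¬ s[i] = a[j]) : pvLcp (s.drop i) (a.drop j) = 0 := by
  rw [List.drop_eq_getElem_cons h1, List.drop_eq_getElem_cons h2]
  simp [pvLcp, hg]

theorem pvLcp_pos (s a : List String) (i j : Nat) (h1 : i < s.length) (h2 : j < a.length)
    (hg : s[i] = a[j]) : pvLcp (s.drop i) (a.drop j) = pvLcp (s.drop (i+1)) (a.drop (j+1)) + 1 := by
  rw [List.drop_eq_getElem_cons h1, List.drop_eq_getElem_cons h2]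
  simp [pvLcp, hg]

-- the extension loop computes the LCP of the two suffixes
theorem pvExtA_eq (s a : List String) (fuel ii jj : Nat) (hfuel : s.length - ii ≤ fuel) :
    pvExtA s a fuel ii jj = (ii + pvLcp (s.drop ii) (a.drop jj), jj + pvLcp (s.drop ii) (a.drop jj)) := by
  induction fuel generalizing ii jj with
  | zero =>
    have h1 : s.length ≤ ii := by omega
    rw [List.drop_eq_nil_of_le h1]
    cases a.drop jj <;> simp [pvExtA, pvLcp]
  | succ fuel ih =>
    rw [pvExtA]
    split
    · rename_i h
      obtain ⟨h1, h2, h3⟩ := h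
      have hg : s[ii] = a[jj] := by
        simpa [List.getD_eq_getElem?_getD, List.getElem?_eq_getElem, h1, h2] using h3
      rw [ih (ii+1) (jj+1) (by omega), pvLcp_pos s a ii jj h1 h2 hg]
      simp
      omega
    · rename_i h
      rcases Nat.lt_or_ge ii s.length with h1 | h1
      · rcases Nat.lt_or_ge jj a.length with h2 | h2
        · have h3 : ¬ s.getD ii "" = a.getD jj "" := by tauto
          have hg : ¬ s[ii] = a[jj] := by
            simpa [List.getD_eq_getElem?_getD, List.getElem?_eq_getElem, h1, h2] using h3
          rw [pvLcp_zero s a ii jj h1 h2 hg]; simp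
        · rw [List.drop_eq_nil_of_le h2, pvLcp_nil_right]; simp
      · rw [List.drop_eq_nil_of_le h1]; cases a.drop jj <;> simp [pvLcp]

theorem pvRowB_get (si : String) (a : List String) (nxt : List Nat) (j : Nat) :
    (pvRowB si a nxt).getD j 0
      = if h : j < a.length then (if si = a[j] then nxt.getD (j + 1) 0 + 1 else 0) else 0 := by
  unfold pvRowB
  split
  · rename_i h
    rw [List.getD_eq_getElem?_getD, List.getElem?_append_left (by simpa using h)]
    simp [h, List.getD_eq_getElem?_getD]
  · rename_i h
    rw [List.getD_eq_getElem?_getD, List.getElem?_append_right (by simpa using h)]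
    rcases Nat.eq_or_lt_of_le (Nat.le_of_not_lt h) with he | hl
    · simp [← he]
    · have : j - (List.range a.length).length ≥ 1 := by simp; omega
      rw [List.getElem?_eq_none (by simpa using this)]; rfl

-- the DP rows tabulate exactly those LCPs
theorem pvRowsB_get (a : List String) (s : List String) (i j : Nat) (hij : i ≤ s.length) :
    ((pvRowsB a s).getD i []).getD j 0 = pvLcp (s.drop i) (a.drop j) := by
  induction s generalizing i j with
  | nil =>
    have hz : i = 0 := by simpa using hij
    subst hz
    simp only [pvRowsB, List.getD_cons_zero, List.drop_nil]
    have h0 : (List.replicate (a.length + 1) 0).getD j 0 = 0 := by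
      rw [List.getD_eq_getElem?_getD, List.getElem?_replicate]
      split <;> rfl
    rw [h0]
    cases a.drop j <;> simp [pvLcp]
  | cons si rest ih =>
    cases i with
    | zero =>
      simp only [pvRowsB, List.getD_cons_zero, List.drop_zero]
      rw [pvRowB_get]
      have hhead : (pvRowsB a rest).headD [] = (pvRowsB a rest).getD 0 [] := by
        cases pvRowsB a rest <;> rfl
      split
      · rename_i h
        have ha : a.drop j = a[j] :: a.drop (j+1) := List.drop_eq_getElem_cons h
        rw [hhead, ih 0 (j+1) (by omega)]
        rw [ha]; simp [pvLcp]
      · rename_i h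
        rw [List.drop_eq_nil_of_le (Nat.le_of_not_lt h), pvLcp_nil_right]
    | succ i' =>
      simp only [pvRowsB, List.getD_cons_succ, List.drop_succ_cons]
      exact ih i' j (by simpa using hij)

theorem pvScanB_le_aux (m : Nat) (row : List Nat) (c : Nat)
    (hrow : ∀ j, row.getD j 0 ≤ c) (fuel : Nat) :
    ∀ (j best : Nat), best ≤ c → pvScanB m row fuel j best ≤ c := by
  induction fuel with
  | zero => intro j best hb; simpa [pvScanB] using hb
  | succ fuel ih =>
    intro j best hb
    rw [pvScanB]
    dsimp only
    split
    · split
      · apply ih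
        have := hrow j
        split <;> omega
      · exact ih _ _ hb
    · exact hb

-- the middle loop of A equals the table scan of B (f tracked as a take of the suffix)
theorem pvInnerA_eq_scan (s a : List String) (i : Nat) (hi : i < s.length) (fuel : Nat) :
    ∀ (j best : Nat), best ≤ s.length - i →
    pvInnerA s a i fuel j ((s.drop i).take best)
      = (s.drop i).take (pvScanB a.length ((pvRowsB a s).getD i []) fuel j best) := by
  induction fuel with
  | zero => intro j best _; rfl
  | succ fuel ih =>
    intro j best hb
    rw [pvInnerA, pvScanB]
    by_cases hj : j < a.length
    · simp only [hj, if_pos]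
      have hrow : ((pvRowsB a s).getD i []).getD j 0 = pvLcp (s.drop i) (a.drop j) :=
        pvRowsB_get a s i j (le_of_lt hi)
      by_cases heq : s.getD i "" = a.getD j ""
      · have hg : s[i] = a[j] := by
          simpa [List.getD_eq_getElem?_getD, List.getElem?_eq_getElem, hi, hj] using heq
        have hk1 : pvLcp (s.drop i) (a.drop j) = pvLcp (s.drop (i+1)) (a.drop (j+1)) + 1 :=
          pvLcp_pos s a i j hi hj hg
        set k := pvLcp (s.drop i) (a.drop j) with hkdef
        have hkpos : 0 < k := by omega
        have hkle : k ≤ s.length - i := by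
          have := pvLcp_le (s.drop i) (a.drop j); simpa using this
        simp only [heq, if_pos, hrow]
        rw [if_pos (Nat.pos_iff_ne_zero.mp hkpos)]
        have hext : pvExtA s a s.length i j = (i + k, j + k) :=
          pvExtA_eq s a s.length i j (by omega)
        rw [hext]
        have hlen : ((s.drop i).take best).length = best := by simp; omega
        have hslice : PySem.List.slice s (some (i : Int)) (some ((i + k : Nat) : Int))
            = (s.drop i).take k := by
          rw [PySem.List.slice_natCast]
          congr 1
          omega
        simp only [hlen]
        have hred : (i + k - i) = k := by omega
        rw [hred]
        by_cases hbk : best < k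
        · rw [if_pos hbk, hslice, if_pos (by omega : k > best)]
          exact ih (j + k) k hkle
        · rw [if_neg hbk, if_neg (by omega : ¬ k > best)]
          exact ih (j + k) best hb
      · have hg : ¬ s[i] = a[j] := by
          simpa [List.getD_eq_getElem?_getD, List.getElem?_eq_getElem, hi, hj] using heq
        have hk0 : pvLcp (s.drop i) (a.drop j) = 0 := pvLcp_zero s a i j hi hj hg
        simp only [heq, hrow, hk0]
        simp only [ne_eq, not_true_eq_false, reduceIte]
        exact ih (j + 1) best hb
    · simp [hj]

-- the outer loops agree step for step
theorem pvOuterA_eq_main (s a : List String) (fuel : Nat) :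
    ∀ (i : Nat) (fs : List (List String)),
    pvOuterA s a fuel i fs = pvMainB s a (pvRowsB a s) fuel i fs := by
  induction fuel with
  | zero => intro i fs; rfl
  | succ fuel ih =>
    intro i fs
    rw [pvOuterA, pvMainB]
    by_cases hi : i < s.length
    · simp only [hi, if_pos]
      set best := pvScanB a.length ((pvRowsB a s).getD i []) a.length 0 0 with hbdef
      have hble : best ≤ s.length - i := by
        apply pvScanB_le_aux
        · intro j
          rw [pvRowsB_get a s i j (le_of_lt hi)]
          have := pvLcp_le (s.drop i) (a.drop j); simpa using this
        · omega
      have hf : pvInnerA s a i a.length 0 [] = (s.drop i).take best := by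
        have h0 : ([] : List String) = (s.drop i).take 0 := rfl
        rw [h0, pvInnerA_eq_scan s a i hi a.length 0 0 (by omega)]
      rw [hf]
      have hlen : ((s.drop i).take best).length = best := by simp; omega
      by_cases hb0 : best = 0
      · rw [hb0]
        simp only [List.take_zero]
        simp
        exact ih (i + 1) fs
      · have hne : (s.drop i).take best ≠ [] := by
          intro hc
          have := congrArg List.length hc
          rw [hlen] at this
          simp at this
          exact hb0 this
        rw [if_pos hne, if_pos hb0]
        have hmax : i + max ((s.drop i).take best).length 1 = i + best := by
          rw [hlen]; omega
        rw [hmax]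
        have hslice : PySem.List.slice s (some (i : Int)) (some ((i : Int) + (best : Int)))
            = (s.drop i).take best := PySem.List.slice_natCast_add s i best
        rw [hslice]
        exact ih (i + best) (fs ++ [(s.drop i).take best])
    · simp [hi]

-- ===== VERDICT (by name: the statement is the Claim_ definition above) =====
theorem greedily_extract_py_spec : Claim_equal_greedily_extract_py := by
  intro a s _
  unfold Spec_greedily_extract_py greedily_extract_py greedily_extract_py_alt
  exact pvOuterA_eq_main s a s.length 0 []
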